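-- pv_equiv track=rewrite | github.com/gisuperu/garakuta | python/router_ip_union.py | different
-- ===== SOURCE A (Python) =====
-- def different(ip1, wildcard1, ip2, wildcard2):
--     diff = ip1 ^ ip2 # ipの差分を抽出
--     wildcard = wildcard1 | wildcard2 # wildcardを統合
--
--     diff = diff & ~wildcard # wildcard以外のip差分をさらに抽出
--
--     # 1のビットが1つ以下か判定(なければ0をreturn)
--     bitmask = 1
--     while(diff & bitmask == 0 and bitmask < 256):
--         bitmask <<= 1
--     if diff != bitmask:
--         return 0
--
--     # 差が一つしかないことが確認できたため新しいwildcardをreturn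
--     return wildcard | diff
-- ===== SOURCE B (Python) =====
-- def different(ip1, wildcard1, ip2, wildcard2):
--     wildcard = wildcard1 | wildcard2
--     diff = (ip1 ^ ip2) & ~wildcard
--     # merge iff diff is exactly one set bit no higher than bit 8
--     if diff != 0 and diff & (diff - 1) == 0 and diff <= 256:
--         return wildcard | diff
--     return 0
-- ===== Notes on version B (the rewrite author's own statement) =====
-- stated objective: simpler
-- what changed: Replaces the bit-scanning while loop and its final bitmask comparison with a closed-form arithmetic test (diff != 0 and diff & (diff-1) == 0 and diff <= 256) for 'exactly one differing bit at or below bit 8'.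
import Mathlib
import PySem

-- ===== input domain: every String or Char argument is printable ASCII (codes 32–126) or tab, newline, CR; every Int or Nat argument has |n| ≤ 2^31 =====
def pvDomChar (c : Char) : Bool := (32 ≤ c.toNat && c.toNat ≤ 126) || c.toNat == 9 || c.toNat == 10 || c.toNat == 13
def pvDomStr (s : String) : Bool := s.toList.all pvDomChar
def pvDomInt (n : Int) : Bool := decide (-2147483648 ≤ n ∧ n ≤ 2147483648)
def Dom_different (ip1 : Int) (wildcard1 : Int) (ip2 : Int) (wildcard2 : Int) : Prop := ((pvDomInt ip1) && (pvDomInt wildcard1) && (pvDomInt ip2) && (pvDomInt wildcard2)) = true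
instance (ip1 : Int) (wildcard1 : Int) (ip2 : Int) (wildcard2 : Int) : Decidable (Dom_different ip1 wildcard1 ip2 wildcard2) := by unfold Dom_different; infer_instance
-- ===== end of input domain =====

-- B replaces A's bit-scanning while loop with a closed-form single-set-bit test (diff != 0 and diff&(diff-1)==0 and diff <= 256); objective: simpler.


-- ===== PORT A =====
-- the while loop: bitmask starts at 1 and doubles; the guard fails at latest when
-- bitmask = 256, so 9 units of fuel are always enough (fuel never runs out).
def differentLoop (diff : Int) (bitmask : Int) (fuel : Nat) : Int :=
  match fuel with
  | 0 => bitmask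
  | f + 1 =>
      if PySem.Int.band diff bitmask = 0 ∧ bitmask < 256 then
        differentLoop diff (bitmask <<< (1 : Nat)) f
      else bitmask

def different (ip1 : Int) (wildcard1 : Int) (ip2 : Int) (wildcard2 : Int) : Int :=
  let diff0 := PySem.Int.bxor ip1 ip2
  let wildcard := PySem.Int.bor wildcard1 wildcard2
  let diff := PySem.Int.band diff0 (Int.not wildcard)
  let bitmask := differentLoop diff 1 9
  if diff ≠ bitmask then 0
  else PySem.Int.bor wildcard diff

-- ===== PORT B =====
def different_alt (ip1 : Int) (wildcard1 : Int) (ip2 : Int) (wildcard2 : Int) : Int :=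
  let wildcard := PySem.Int.bor wildcard1 wildcard2
  let diff := PySem.Int.band (PySem.Int.bxor ip1 ip2) (Int.not wildcard)
  if diff ≠ 0 ∧ PySem.Int.band diff (diff - 1) = 0 ∧ diff ≤ 256 then
    PySem.Int.bor wildcard diff
  else 0

-- ===== PRECONDITION & SPEC =====
def Spec_different (ip1 : Int) (wildcard1 : Int) (ip2 : Int) (wildcard2 : Int) (out : Int) : Prop := out = different_alt ip1 wildcard1 ip2 wildcard2
instance (ip1 : Int) (wildcard1 : Int) (ip2 : Int) (wildcard2 : Int) (out : Int) : Decidable (Spec_different ip1 wildcard1 ip2 wildcard2 out) := by unfold Spec_different; infer_instance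

-- ===== CLAIM (what is proved, stated in full; the proofs are below) =====
def Claim_equal_different : Prop := ∀ (ip1 : Int) (wildcard1 : Int) (ip2 : Int) (wildcard2 : Int), Dom_different ip1 wildcard1 ip2 wildcard2 → Spec_different ip1 wildcard1 ip2 wildcard2 (different ip1 wildcard1 ip2 wildcard2)

-- ===== LEMMAS AND PROOFS =====

-- The loop's final bitmask is always one of the nine powers of two it can visit.
theorem differentLoop_mem (d : Int) :
    differentLoop d 1 9 = 1 ∨ differentLoop d 1 9 = 2 ∨ differentLoop d 1 9 = 4 ∨
    differentLoop d 1 9 = 8 ∨ differentLoop d 1 9 = 16 ∨ differentLoop d 1 9 = 32 ∨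
    differentLoop d 1 9 = 64 ∨ differentLoop d 1 9 = 128 ∨ differentLoop d 1 9 = 256 := by
  simp only [differentLoop]
  split_ifs with h1 h2 h3 h4 h5 h6 h7 h8 h9
  · exact absurd h9.2 (by decide)
  all_goals decide

-- single-set-bit characterisation on Fin 257, by computation
set_option maxRecDepth 10000 in
theorem pow2_fin : ∀ n : Fin 257, n.val ≠ 0 → n.val &&& (n.val - 1) = 0 →
    n.val = 1 ∨ n.val = 2 ∨ n.val = 4 ∨ n.val = 8 ∨ n.val = 16 ∨ n.val = 32 ∨
    n.val = 64 ∨ n.val = 128 ∨ n.val = 256 := by decide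

-- B's test characterises membership in the nine merge-able values
theorem pow2_int (d : Int) (h0 : d ≠ 0) (h1 : PySem.Int.band d (d - 1) = 0) (h2 : d ≤ 256) :
    d = 1 ∨ d = 2 ∨ d = 4 ∨ d = 8 ∨ d = 16 ∨ d = 32 ∨ d = 64 ∨ d = 128 ∨ d = 256 := by
  cases d with
  | ofNat n =>
      simp only [Int.ofNat_eq_natCast] at h0 h1 h2 ⊢
      have hn : n ≠ 0 := by exact_mod_cast h0
      have hd1 : ((n : Int) - 1) = ((n - 1 : Nat) : Int) := by omega
      rw [hd1, PySem.Int.band_natCast] at h1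
      have hland : n &&& (n - 1) = 0 := by exact_mod_cast h1
      have hle : n ≤ 256 := by omega
      have hmem : n = 1 ∨ n = 2 ∨ n = 4 ∨ n = 8 ∨ n = 16 ∨ n = 32 ∨ n = 64 ∨ n = 128 ∨ n = 256 :=
        pow2_fin ⟨n, by omega⟩ hn hland
      rcases hmem with h|h|h|h|h|h|h|h|h <;> subst h <;> decide
  | negSucc m =>
      have hd1 : (Int.negSucc m) - 1 = Int.negSucc (m + 1) := by
        rw [Int.negSucc_eq, Int.negSucc_eq]; push_cast; ring
      rw [hd1] at h1
      simp [PySem.Int.band] at h1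
      omega

-- core: A's (loop + comparison) equals B's closed-form test, for any wildcard w and diff d
theorem core (w d : Int) :
    (if d ≠ differentLoop d 1 9 then 0 else PySem.Int.bor w d) =
    (if d ≠ 0 ∧ PySem.Int.band d (d - 1) = 0 ∧ d ≤ 256 then PySem.Int.bor w d else 0) := by
  by_cases hmem : d = 1 ∨ d = 2 ∨ d = 4 ∨ d = 8 ∨ d = 16 ∨ d = 32 ∨ d = 64 ∨ d = 128 ∨ d = 256
  · rcases hmem with h|h|h|h|h|h|h|h|h <;> subst h <;>
      rw [if_neg (by decide), if_pos (by decide)]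
  · rw [if_pos, if_neg]
    · intro ⟨h0, h1, h2⟩
      exact hmem (pow2_int d h0 h1 h2)
    · rcases differentLoop_mem d with h|h|h|h|h|h|h|h|h <;> rw [h] <;>
        intro hd <;> exact hmem (by tauto)

-- ===== VERDICT (by name: the statement is the Claim_ definition above) =====
theorem different_spec : Claim_equal_different := by
  intro ip1 w1 ip2 w2 _
  unfold Spec_different different different_alt
  exact core _ _
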